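-- pv_equiv track=rewrite | github.com/Keeplingshi/Event-Extraction | model/tensorflow/data_process/data_process.py | content2list
-- ===== SOURCE A (Python) =====
-- punctuation = """!"#$%&'()*+,./:;<=>?@[\]^`{|}~"""
--
-- def content2list(sgm_content, start_end_type_list):
--     word_list=[]
--     type_list=[]
--     sgm_content=sgm_content.replace('\n',' ')
--     wi=0
--     word=''
--     start=0
--     for w in sgm_content:
--         if w!=' ':
--             word=word+w
--
--         if w==' ':
--             end=wi
--             word_list.append(word)
--             #解决触发词最后一个字符为标点符号的情况
--             w_end=-1
--             for character in word:
--                 if character in punctuation: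
--                     w_end=word.index(character)
--                     break
--             if w_end==-1:
--                 if (start,end) in start_end_type_list.keys():
--                     type_list.append(start_end_type_list[(start,end)])
--                 else:
--                     type_list.append(34)
--             else:
--                 end=end-len(word)+w_end
--                 if (start,end) in start_end_type_list.keys():
--                     type_list.append(start_end_type_list[(start,end)])
--                 else:
--                     type_list.append(34)
--
--             word=''
--             start=wi+1
--
--         wi+=1
--     assert len(type_list)==len(word_list),'content2list单词数目与实践类型数目不匹配'
--     return word_list,type_list
-- ===== SOURCE B (Python) =====
-- punctuation = """!"#$%&'()*+,./:;<=>?@[\]^`{|}~"""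
--
-- def content2list(sgm_content, start_end_type_list):
--     # two-phase: split() tokenization with cumulative offsets, then label each token
--     words = sgm_content.replace('\n', ' ').split(' ')[:-1]
--     starts = []
--     off = 0
--     for w in words:
--         starts.append(off)
--         off += len(w) + 1
--     type_list = []
--     for w, start in zip(words, starts):
--         i = next((k for k, ch in enumerate(w) if ch in punctuation), len(w))
--         type_list.append(start_end_type_list.get((start, start + i), 34))
--     assert len(type_list) == len(words), 'content2list单词数目与实践类型数目不匹配'
--     return words, type_list
-- ===== Notes on version B (the rewrite author's own statement) =====
-- stated objective: simpler
-- what changed: Replaces A's fused character loop with mutable word/wi/start state and a per-word character scan plus word.index() call by a two-phase pipeline: split(' ') tokenization (dropping the trailing segment) with cumulative offsets, then a separate labelling pass using the first-punctuation index and dict.get; the C-level split removes the per-character Python loop.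
import Mathlib
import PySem

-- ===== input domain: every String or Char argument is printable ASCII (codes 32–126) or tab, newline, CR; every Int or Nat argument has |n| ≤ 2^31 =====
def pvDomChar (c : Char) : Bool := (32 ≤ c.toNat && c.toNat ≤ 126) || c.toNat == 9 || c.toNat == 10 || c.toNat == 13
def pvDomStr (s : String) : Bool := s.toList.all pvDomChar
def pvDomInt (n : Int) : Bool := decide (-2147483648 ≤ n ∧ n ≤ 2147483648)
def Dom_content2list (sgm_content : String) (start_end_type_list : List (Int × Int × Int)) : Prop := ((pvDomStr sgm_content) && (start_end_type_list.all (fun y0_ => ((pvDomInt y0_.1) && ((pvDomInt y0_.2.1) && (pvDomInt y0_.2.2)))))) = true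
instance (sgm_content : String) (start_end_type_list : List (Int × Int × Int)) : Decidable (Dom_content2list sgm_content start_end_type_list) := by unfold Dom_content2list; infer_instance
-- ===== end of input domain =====

-- B replaces A's fused character loop (mutable word/wi/start state plus an inner index() scan per word)
-- by a split(' ')-based tokenization with cumulative offsets and a separate labelling pass (objective: simpler).

-- the module constant `punctuation` (in a non-raw Python string, `\]` is backslash + ']')
def pvPunct : List Char := "!\"#$%&'()*+,./:;<=>?@[\\]^`{|}~".toList

-- dict lookup with default 34: Python `if k in d.keys(): d[k] else 34` / `d.get(k, 34)`;
-- the dict is an association list, lookup = first match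
def pvLookup34 (l : List (Int × Int × Int)) (s e : Int) : Int :=
  match l.find? (fun p => p.1 == s && p.2.1 == e) with
  | some p => p.2.2
  | none => 34

-- ===== PORT A =====
-- A's inner loop `for character in word: if character in punctuation: w_end = word.index(character); break`
-- (`full` stays the whole word that `.index` searches; the `none` branch is unreachable since the
--  scanned character is drawn from a suffix of `full`)
def aWEnd (full : List Char) : List Char → Int
  | [] => -1
  | c :: rest =>
    if pvPunct.contains c then
      match PySem.List.index? full c with
      | some k => (k : Int)
      | none => -1
    else aWEnd full rest

-- one iteration of A's `for w in sgm_content` over the state (word_list, type_list, wi, word, start)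
def aStep (l : List (Int × Int × Int))
    (st : List String × List Int × Int × List Char × Int) (c : Char) :
    List String × List Int × Int × List Char × Int :=
  let (wl, tl, wi, word, start) := st
  let word := if c ≠ ' ' then word ++ [c] else word
  if c = ' ' then
    let endi := wi
    let wl := wl ++ [String.ofList word]
    let wEnd := aWEnd word word
    let tl :=
      if wEnd = -1 then tl ++ [pvLookup34 l start endi]
      else tl ++ [pvLookup34 l start (endi - (word.length : Int) + wEnd)]
    (wl, tl, wi + 1, ([] : List Char), wi + 1)
  else (wl, tl, wi + 1, word, start)

def content2list (sgm_content : String) (start_end_type_list : List (Int × Int × Int)) : List String × List Int :=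
  let cs := (PySem.Str.replace sgm_content "\n" " ").toList
  let st := cs.foldl (aStep start_end_type_list) ([], [], 0, [], 0)
  (st.1, st.2.1)

-- ===== PORT B =====
-- B's `next((k for k, ch in enumerate(w) if ch in punctuation), len(w))`
def bFirstStop (w : List Char) : Int :=
  match w.findIdx? (fun ch => pvPunct.contains ch) with
  | some k => (k : Int)
  | none => (w.length : Int)

-- B's offset loop: starts.append(off); off += len(w) + 1
def bStarts : List (List Char) → Int → List Int
  | [], _ => []
  | w :: ws, off => off :: bStarts ws (off + (w.length : Int) + 1)

def content2list_alt (sgm_content : String) (start_end_type_list : List (Int × Int × Int)) : List String × List Int :=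
  let cs := (PySem.Str.replace sgm_content "\n" " ").toList
  let words := (cs.splitOn ' ').dropLast        -- s.split(' ')[:-1]
  let starts := bStarts words 0
  let types := (words.zip starts).map
    (fun p => pvLookup34 start_end_type_list p.2 (p.2 + bFirstStop p.1))
  (words.map String.ofList, types)

-- ===== PRECONDITION & SPEC =====
def Spec_content2list (sgm_content : String) (start_end_type_list : List (Int × Int × Int)) (out : List String × List Int) : Prop := out = content2list_alt sgm_content start_end_type_list
instance (sgm_content : String) (start_end_type_list : List (Int × Int × Int)) (out : List String × List Int) : Decidable (Spec_content2list sgm_content start_end_type_list out) := by unfold Spec_content2list; infer_instance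

-- ===== CLAIM (what is proved, stated in full; the proofs are below) =====
def Claim_equal_content2list : Prop := ∀ (sgm_content : String) (start_end_type_list : List (Int × Int × Int)), Dom_content2list sgm_content start_end_type_list → Spec_content2list sgm_content start_end_type_list (content2list sgm_content start_end_type_list)

-- ===== LEMMAS AND PROOFS =====

-- splitting a list that begins with a separator-free block prepends that block to the first piece
theorem splitOnP_prepend (p : Char → Bool) (w : List Char)
    (hw : ∀ c ∈ w, p c = false) (cs : List Char) :
    List.splitOnP p (w ++ cs) = (List.splitOnP p cs).modifyHead (w ++ ·) := by
  induction w with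
  | nil =>
    cases h : List.splitOnP p cs with
    | nil => exact absurd h (List.splitOnP_ne_nil p cs)
    | cons a t => simp [h]
  | cons c w ih =>
    have hc : p c = false := hw c (by simp)
    have hw' : ∀ c' ∈ w, p c' = false := fun c' h' => hw c' (by simp [h'])
    rw [List.cons_append, List.splitOnP_cons, hc, ih hw']
    cases h : List.splitOnP p cs with
    | nil => exact absurd h (List.splitOnP_ne_nil p cs)
    | cons a t => simp

-- A's inner scan returns the index of the first punctuation character (generalized over a scanned prefix)
theorem aWEnd_go (pre w : List Char) (hpre : ∀ c ∈ pre, pvPunct.contains c = false) :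
    aWEnd (pre ++ w) w =
      (match w.findIdx? (fun ch => pvPunct.contains ch) with
       | some k => ((pre.length + k : Nat) : Int)
       | none => -1) := by
  induction w generalizing pre with
  | nil => simp [aWEnd]
  | cons c rest ih =>
    rw [List.findIdx?_cons]
    by_cases hc : pvPunct.contains c = true
    · have hidx : PySem.List.index? (pre ++ c :: rest) c = some pre.length := by
        rw [PySem.List.index?_eq_some_iff]
        exact ⟨pre, rest, rfl, rfl, fun hmem => absurd (by simpa using hc : c ∈ pvPunct) (by simpa using hpre c hmem)⟩
      simp only [aWEnd]
      rw [if_pos hc, hidx]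
      simp [show c ∈ pvPunct from by simpa using hc]
    · have hc' : pvPunct.contains c = false := by simpa using hc
      have hpre' : ∀ c' ∈ pre ++ [c], pvPunct.contains c' = false := by
        intro c' h'
        rcases List.mem_append.mp h' with h' | h'
        · exact hpre c' h'
        · simp at h'; subst h'; exact hc'
      have hrec := ih (pre ++ [c]) hpre'
      rw [List.append_assoc, List.singleton_append] at hrec
      simp only [aWEnd]
      rw [if_neg hc, hrec]
      simp only [List.length_append, List.length_cons, List.length_nil]
      cases h : List.findIdx? (fun ch => pvPunct.contains ch) rest with
      | none => simp [show c ∉ pvPunct from by simpa using hc']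
      | some k => simp [show c ∉ pvPunct from by simpa using hc']; ring

-- the label A appends for a flushed word equals B's label for the token (word, start)
theorem labelA_eq (l : List (Int × Int × Int)) (word : List Char) (start : Int) :
    (if aWEnd word word = -1 then
       pvLookup34 l start (start + (word.length : Int))
     else
       pvLookup34 l start (start + (word.length : Int) - (word.length : Int) + aWEnd word word))
    = pvLookup34 l start (start + bFirstStop word) := by
  have h := aWEnd_go [] word (by intro c hc; simp at hc)
  rw [List.nil_append] at h
  unfold bFirstStop
  cases hf : word.findIdx? (fun ch => pvPunct.contains ch) with
  | none =>
    rw [hf] at h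
    have h' : aWEnd word word = -1 := h
    rw [if_pos h']
  | some k =>
    rw [hf] at h
    have h' : aWEnd word word = ((0 + k : Nat) : Int) := h
    rw [Nat.zero_add] at h'
    rw [if_neg (by rw [h']; omega), h']
    congr 1
    ring

-- Main loop invariant: A's fold from state (wl, tl, start + |word|, word, start), where word is the
-- space-free block accumulated since position start, produces exactly B's split-based words and labels
-- for the remaining text word ++ cs.
theorem main_loop (l : List (Int × Int × Int)) (cs : List Char) :
    ∀ (wl : List String) (tl : List Int) (word : List Char) (start : Int),
      (∀ c ∈ word, c ≠ ' ') →
      ((cs.foldl (aStep l) (wl, tl, start + (word.length : Int), word, start)).1,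
       (cs.foldl (aStep l) (wl, tl, start + (word.length : Int), word, start)).2.1) =
        (wl ++ (((word ++ cs).splitOn ' ').dropLast).map String.ofList,
         tl ++ ((((word ++ cs).splitOn ' ').dropLast).zip
                  (bStarts (((word ++ cs).splitOn ' ').dropLast) start)).map
            (fun p => pvLookup34 l p.2 (p.2 + bFirstStop p.1))) := by
  induction cs with
  | nil =>
    intro wl tl word start hw
    have hsplit : word.splitOn ' ' = [word] := by
      have h := splitOnP_prepend (fun x => x == ' ') word
        (fun c h => beq_eq_false_iff_ne.mpr (hw c h)) []
      rw [List.append_nil, List.splitOnP_nil] at h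
      rw [List.splitOn, h]
      simp
    rw [List.foldl_nil, List.append_nil, hsplit]
    simp
  | cons c cs ih =>
    intro wl tl word start hw
    by_cases hc : c = ' '
    · subst hc
      have hsplit : (word ++ ' ' :: cs).splitOn ' ' = word :: cs.splitOn ' ' := by
        rw [List.splitOn, splitOnP_prepend _ word
          (fun x h => beq_eq_false_iff_ne.mpr (hw x h)), List.splitOnP_cons]
        simp [List.splitOn]
      have hstep : aStep l (wl, tl, start + (word.length : Int), word, start) ' ' =
          (wl ++ [String.ofList word],
           tl ++ [pvLookup34 l start (start + bFirstStop word)],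
           start + (word.length : Int) + 1, ([] : List Char),
           start + (word.length : Int) + 1) := by
        simp only [aStep, if_true]
        rw [if_neg (fun h : (' ' : Char) ≠ ' ' => h rfl)]
        rw [← apply_ite (fun z => tl ++ [z]), labelA_eq l word start]
      have ih' := ih (wl ++ [String.ofList word])
        (tl ++ [pvLookup34 l start (start + bFirstStop word)]) []
        (start + (word.length : Int) + 1) (by intro x h; simp at h)
      simp only [List.length_nil, Nat.cast_zero, add_zero, List.nil_append] at ih'
      rw [List.foldl_cons, hstep, ih', hsplit]
      cases hrest : cs.splitOn ' ' with
      | nil => exact absurd hrest (List.splitOnP_ne_nil _ cs)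
      | cons a t =>
        rw [List.dropLast_cons₂]
        simp [bStarts, List.append_assoc]
    · have hstep : aStep l (wl, tl, start + (word.length : Int), word, start) c =
          (wl, tl, start + ((word ++ [c]).length : Int), word ++ [c], start) := by
        simp only [aStep]
        rw [if_pos hc, if_neg hc]
        simp only [List.length_append, List.length_cons, List.length_nil]
        push_cast
        ring_nf
      have hw' : ∀ x ∈ word ++ [c], x ≠ ' ' := by
        intro x h
        rcases List.mem_append.mp h with h | h
        · exact hw x h
        · simp at h; subst h; exact hc
      have ih' := ih wl tl (word ++ [c]) start hw'
      rw [List.foldl_cons, hstep, ih']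
      rw [List.append_assoc, List.singleton_append]

-- ===== VERDICT (by name: the statement is the Claim_ definition above) =====
theorem content2list_spec : Claim_equal_content2list := by
  intro sgm_content start_end_type_list _
  unfold Spec_content2list content2list content2list_alt
  have h := main_loop start_end_type_list
    (PySem.Str.replace sgm_content "\n" " ").toList [] [] [] 0
    (by intro c hc; simp at hc)
  simp only [List.length_nil, Nat.cast_zero, add_zero, List.nil_append] at h
  exact Prod.ext_iff.mpr ⟨(Prod.ext_iff.mp h).1, (Prod.ext_iff.mp h).2⟩
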